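-- pv_equiv track=rewrite | github.com/vitt0ri0/yalgorithms | topic_61_strings/task_b_control_dict_fail.py | solution
-- ===== SOURCE A (Python) =====
-- def count_hash(s):
--     d = dict()
--     for c in s:
--         el = d.get(c, None)
--         if el:
--             d[c] += 1
--         else:
--             d[c] = 1
--     return d
--
-- def solution(word1, word2):
--     hash1 = count_hash(word1)
--     hash2 = count_hash(word2)
--
--     diff_neg = 0
--     diff_pos = 0
--     myset = set(word1 + word2)
--     for char in myset:
--         value1 = hash1.get(char, 0)
--         value2 = hash2.get(char, 0)
--         diff = value1 - value2
--         if diff < 0: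
--             diff_neg += abs(diff)
--         elif diff > 0:
--             diff_pos += diff
--
--     return diff_neg in (0, 1) and diff_pos in (0, 1)
-- ===== SOURCE B (Python) =====
-- def solution(word1, word2):
--     xs = sorted(word1)
--     ys = sorted(word2)
--     i = j = 0
--     extra1 = extra2 = 0
--     while i < len(xs) and j < len(ys):
--         if xs[i] == ys[j]:
--             i += 1
--             j += 1
--         elif xs[i] < ys[j]:
--             extra1 += 1
--             i += 1
--         else:
--             extra2 += 1
--             j += 1
--     extra1 += len(xs) - i
--     extra2 += len(ys) - j
--     return extra1 <= 1 and extra2 <= 1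
-- ===== Notes on version B (the rewrite author's own statement) =====
-- stated objective: alternative
-- what changed: Replaces the hash-count-and-union-scan with sort-then-merge: both words are sorted and a two-pointer merge counts the unmatched characters on each side (the sizes of the two multiset differences), with no dict or set at all.
import Mathlib
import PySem

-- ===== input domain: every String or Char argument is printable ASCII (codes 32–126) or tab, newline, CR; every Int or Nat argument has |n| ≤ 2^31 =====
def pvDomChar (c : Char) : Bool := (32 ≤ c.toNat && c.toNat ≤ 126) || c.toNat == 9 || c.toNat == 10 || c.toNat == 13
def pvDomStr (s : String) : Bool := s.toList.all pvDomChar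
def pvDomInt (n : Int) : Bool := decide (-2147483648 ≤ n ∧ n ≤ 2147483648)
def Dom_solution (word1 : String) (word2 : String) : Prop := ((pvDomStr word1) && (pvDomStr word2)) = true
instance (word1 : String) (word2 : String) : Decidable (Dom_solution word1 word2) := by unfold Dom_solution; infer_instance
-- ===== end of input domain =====

-- B replaces A's two hash-count dicts plus a loop over the union set by sorting both
-- words and counting unmatched characters with a two-pointer merge; objective: alternative.

-- ===== PORT A =====
def countHash (s : String) : PySem.Dict Char Int :=
  s.toList.foldl (fun d c =>
    match d.get? c with
    | some v => if v ≠ 0 then d.insert c (v + 1) else d.insert c 1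
    | none => d.insert c 1) PySem.Dict.empty

def solution (word1 : String) (word2 : String) : Bool :=
  let hash1 := countHash word1
  let hash2 := countHash word2
  let myset : PySem.Set Char := PySem.Set.ofList (word1 ++ word2).toList
  let r := myset.foldl (fun (acc : Int × Int) char =>
      let diff := hash1.getD char 0 - hash2.getD char 0
      if diff < 0 then (acc.1 + |diff|, acc.2)
      else if diff > 0 then (acc.1, acc.2 + diff) else acc) (0, 0)
  ((r.1 == 0) || (r.1 == 1)) && ((r.2 == 0) || (r.2 == 1))

-- ===== PORT B =====
-- Source B's while loop over the two sorted lists, as the obvious structural recursion on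
-- the unread suffixes; the post-loop additions of the leftover lengths are the base cases.
def mergeCount : List Char → List Char → Int × Int
  | [], ys => (0, (ys.length : Int))
  | x :: xs, [] => ((xs.length : Int) + 1, 0)
  | x :: xs, y :: ys =>
      if x = y then mergeCount xs ys
      else if x < y then
        ((mergeCount xs (y :: ys)).1 + 1, (mergeCount xs (y :: ys)).2)
      else
        ((mergeCount (x :: xs) ys).1, (mergeCount (x :: xs) ys).2 + 1)
termination_by xs ys => xs.length + ys.length

def solution_alt (word1 : String) (word2 : String) : Bool :=
  let xs := PySem.List.sorted word1.toList (fun c => c) false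
  let ys := PySem.List.sorted word2.toList (fun c => c) false
  let p := mergeCount xs ys
  decide (p.1 ≤ 1) && decide (p.2 ≤ 1)

-- ===== PRECONDITION & SPEC =====
def Spec_solution (word1 : String) (word2 : String) (out : Bool) : Prop := out = solution_alt word1 word2
instance (word1 : String) (word2 : String) (out : Bool) : Decidable (Spec_solution word1 word2 out) := by unfold Spec_solution; infer_instance

-- ===== CLAIM (what is proved, stated in full; the proofs are below) =====
def Claim_equal_solution : Prop := ∀ (word1 : String) (word2 : String), Dom_solution word1 word2 → Spec_solution word1 word2 (solution word1 word2)

-- ===== LEMMAS AND PROOFS =====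

-- invariant of A's count_hash loop: the dict maps c to its running count, absent while the count is 0
theorem ch_aux (l : List Char) (d : PySem.Dict Char Int) (m : Char → Int)
    (h : ∀ c, d.get? c = if m c = 0 then none else some (m c)) (hm : ∀ c, 0 ≤ m c) :
    ∀ c, (l.foldl (fun d c =>
      match d.get? c with
      | some v => if v ≠ 0 then d.insert c (v + 1) else d.insert c 1
      | none => d.insert c 1) d).get? c
    = if m c + l.count c = 0 then none else some (m c + l.count c) := by
  induction l generalizing d m with
  | nil => intro c; simpa using h c
  | cons x t ih =>
    have hstep : (match d.get? x with
      | some v => if v ≠ 0 then d.insert x (v + 1) else d.insert x 1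
      | none => d.insert x 1) = d.insert x (m x + 1) := by
      rw [h x]; by_cases hx : m x = 0 <;> simp [hx]
    intro c
    rw [List.foldl_cons, hstep,
      ih (d.insert x (m x + 1)) (fun c => if c = x then m c + 1 else m c)
        (by
          intro c'
          by_cases hc : c' = x
          · subst hc
            rw [PySem.Dict.get?_insert_self]
            have : m c' + 1 ≠ 0 := by have := hm c'; omega
            simp [this]
          · rw [PySem.Dict.get?_insert_of_ne (hne := hc), h c']
            simp [hc])
        (by
          intro c'
          by_cases hc : c' = x
          · simp only [hc]; have := hm x; omega
          · simp only [if_neg hc]; exact hm c')]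
    by_cases hc : c = x
    · subst hc
      simp only [List.count_cons, BEq.rfl, if_true]
      push_cast
      ring_nf
    · have hbx : (c == x) = false := by simpa using hc
      have hxc : ¬ x = c := fun hh => hc hh.symm
      simp [hc, hxc]

theorem countHash_getD (s : String) (c : Char) :
    (countHash s).getD c 0 = (s.toList.count c : Int) := by
  have h := ch_aux s.toList PySem.Dict.empty (fun _ => 0)
    (by intro c; simp [PySem.Dict.get?_empty]) (fun c => le_refl 0) c
  simp only [zero_add] at h
  rw [countHash, PySem.Dict.getD_eq_get?_getD, h]
  by_cases hz : (s.toList.count c : Int) = 0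
  · simp [hz]
  · have hz' : s.toList.count c ≠ 0 := by exact_mod_cast hz
    simp [hz']

-- A's loop with the two sum accumulators, in closed form
theorem loopA (g : Char → Int) (L : List Char) (a b : Int) :
    L.foldl (fun (acc : Int × Int) char =>
      let diff := g char
      if diff < 0 then (acc.1 + |diff|, acc.2)
      else if diff > 0 then (acc.1, acc.2 + diff) else acc) (a, b)
    = (a + (L.map (fun c => if g c < 0 then -g c else 0)).sum,
       b + (L.map (fun c => if 0 < g c then g c else 0)).sum) := by
  induction L generalizing a b with
  | nil => simp
  | cons x t ih =>
    simp only [List.foldl_cons, List.map_cons, List.sum_cons]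
    rcases lt_trichotomy (g x) 0 with h | h | h
    · simp [h, ih, abs_of_neg h, not_lt.mpr (le_of_lt h)]; ring
    · simp [h, ih]
    · simp [h, not_lt.mpr (le_of_lt h), ih]; ring

theorem bool01 (n : Int) (h : 0 ≤ n) : ((n == 0) || (n == 1)) = decide (n ≤ 1) := by
  by_cases h1 : n ≤ 1
  · interval_cases n <;> simp
  · have h0 : ¬ n = 0 := by omega
    have h2 : ¬ n = 1 := by omega
    simp [h0, h2, h1]

-- multiset arithmetic for the merge cases
theorem cons_sub_of_notmem (x : Char) (s t : Multiset Char) (hx : x ∉ t) :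
    (x ::ₘ s) - t = x ::ₘ (s - t) := by
  ext c
  have hxt : t.count x = 0 := Multiset.count_eq_zero.mpr hx
  by_cases hc : c = x
  · subst hc; simp [Multiset.count_sub, hxt]
  · simp [hc, Multiset.count_sub]

theorem sub_cons_of_notmem (x : Char) (s t : Multiset Char) (hx : x ∉ t) :
    t - (x ::ₘ s) = t - s := by
  ext c
  have hxt : t.count x = 0 := Multiset.count_eq_zero.mpr hx
  by_cases hc : c = x
  · subst hc; simp [Multiset.count_sub, hxt]
  · simp [hc, Multiset.count_sub]

-- the two-pointer merge of two sorted lists counts both multiset differences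
theorem mergeCount_eq (xs ys : List Char) :
    xs.Pairwise (· ≤ ·) → ys.Pairwise (· ≤ ·) →
    mergeCount xs ys
      = ((((xs : Multiset Char) - (ys : Multiset Char)).card : Int),
         (((ys : Multiset Char) - (xs : Multiset Char)).card : Int)) := by
  induction xs, ys using mergeCount.induct with
  | case1 ys =>
    intro _ _
    simp [mergeCount]
  | case2 x xs =>
    intro _ _
    simp [mergeCount]
  | case3 xs y ys ih =>
    intro hx hy
    rw [mergeCount, if_pos rfl, ih hx.tail hy.tail]
    have h1 : ((y :: xs : List Char) : Multiset Char) - ((y :: ys : List Char) : Multiset Char) = (xs : Multiset Char) - ys := by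
      rw [← Multiset.cons_coe, ← Multiset.cons_coe, Multiset.sub_cons, Multiset.erase_cons_head]
    have h2 : ((y :: ys : List Char) : Multiset Char) - ((y :: xs : List Char) : Multiset Char) = (ys : Multiset Char) - xs := by
      rw [← Multiset.cons_coe, ← Multiset.cons_coe, Multiset.sub_cons, Multiset.erase_cons_head]
    simp [h1, h2]
  | case4 x xs y ys hne hlt ih =>
    intro hx hy
    have hxmem : x ∉ (y :: ys) := by
      intro hmem
      rcases List.mem_cons.mp hmem with h | h
      · exact hne h
      · exact absurd (lt_of_lt_of_le hlt (List.rel_of_pairwise_cons hy h)) (lt_irrefl x)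
    rw [mergeCount, if_neg hne, if_pos hlt, ih hx.tail hy]
    have hxmem' : x ∉ ((y :: ys : List Char) : Multiset Char) := by simpa using hxmem
    have h1 : ((x :: xs : List Char) : Multiset Char) - ((y :: ys : List Char) : Multiset Char)
        = x ::ₘ ((xs : Multiset Char) - ((y :: ys : List Char) : Multiset Char)) := by
      rw [← Multiset.cons_coe]
      exact cons_sub_of_notmem x _ _ hxmem'
    have h2 : ((y :: ys : List Char) : Multiset Char) - ((x :: xs : List Char) : Multiset Char)
        = ((y :: ys : List Char) : Multiset Char) - (xs : Multiset Char) := by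
      rw [show ((x :: xs : List Char) : Multiset Char) = x ::ₘ (xs : Multiset Char) from (Multiset.cons_coe x xs).symm]
      exact sub_cons_of_notmem x _ _ hxmem'
    simp [h1, h2]
  | case5 x xs y ys hne hnlt ih =>
    intro hx hy
    have hylt : y < x := lt_of_le_of_ne (not_lt.mp hnlt) (fun h => hne h.symm)
    have hymem : y ∉ (x :: xs) := by
      intro hmem
      rcases List.mem_cons.mp hmem with h | h
      · exact absurd (h ▸ hylt) (lt_irrefl x)
      · exact absurd (lt_of_lt_of_le hylt (List.rel_of_pairwise_cons hx h)) (lt_irrefl y)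
    rw [mergeCount, if_neg hne, if_neg hnlt, ih hx hy.tail]
    have hymem' : y ∉ ((x :: xs : List Char) : Multiset Char) := by simpa using hymem
    have h1 : ((x :: xs : List Char) : Multiset Char) - ((y :: ys : List Char) : Multiset Char)
        = ((x :: xs : List Char) : Multiset Char) - (ys : Multiset Char) := by
      rw [show ((y :: ys : List Char) : Multiset Char) = y ::ₘ (ys : Multiset Char) from (Multiset.cons_coe y ys).symm]
      exact sub_cons_of_notmem y _ _ hymem'
    have h2 : ((y :: ys : List Char) : Multiset Char) - ((x :: xs : List Char) : Multiset Char)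
        = y ::ₘ ((ys : Multiset Char) - ((x :: xs : List Char) : Multiset Char)) := by
      rw [← Multiset.cons_coe]
      exact cons_sub_of_notmem y _ _ hymem'
    simp [h1, h2]

-- A's union-set sum of truncated count differences is the size of the multiset difference
theorem sum_pos_card (S l1 l2 : List Char) (hnd : S.Nodup) (hsub : ∀ c ∈ l1, c ∈ S) :
    (S.map (fun c => if 0 < (l1.count c : Int) - (l2.count c : Int)
        then (l1.count c : Int) - (l2.count c : Int) else 0)).sum
      = (((l1 : Multiset Char) - (l2 : Multiset Char)).card : Int) := by
  have hpt : ∀ c : Char, (if 0 < (l1.count c : Int) - (l2.count c : Int)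
      then (l1.count c : Int) - (l2.count c : Int) else 0)
      = ((l1.count c - l2.count c : ℕ) : Int) := by
    intro c
    split_ifs with h <;> omega
  rw [List.map_congr_left (fun c _ => hpt c)]
  have hnat : (S.map (fun c => l1.count c - l2.count c)).sum
      = ((l1 : Multiset Char) - (l2 : Multiset Char)).card := by
    have hcount : ∀ c : Char, ((l1 : Multiset Char) - (l2 : Multiset Char)).count c
        = l1.count c - l2.count c := by
      intro c; rw [Multiset.count_sub, Multiset.coe_count, Multiset.coe_count]
    have hTsub : ((l1 : Multiset Char) - (l2 : Multiset Char)).toFinset ⊆ S.toFinset := by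
      intro a ha
      have hpos : 0 < ((l1 : Multiset Char) - (l2 : Multiset Char)).count a :=
        Multiset.count_pos.mpr (Multiset.mem_toFinset.mp ha)
      rw [hcount a] at hpos
      have hal1 : a ∈ l1 := List.count_pos_iff.mp (by omega)
      exact List.mem_toFinset.mpr (hsub a hal1)
    calc (S.map (fun c => l1.count c - l2.count c)).sum
        = ∑ a ∈ S.toFinset, (l1.count a - l2.count a) := (List.sum_toFinset _ hnd).symm
      _ = ∑ a ∈ S.toFinset, ((l1 : Multiset Char) - (l2 : Multiset Char)).count a := by
            exact Finset.sum_congr rfl (fun a _ => (hcount a).symm)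
      _ = ∑ a ∈ ((l1 : Multiset Char) - (l2 : Multiset Char)).toFinset,
            ((l1 : Multiset Char) - (l2 : Multiset Char)).count a := by
            refine (Finset.sum_subset hTsub ?_).symm
            intro a _ ha
            exact Multiset.count_eq_zero.mpr (fun h => ha (Multiset.mem_toFinset.mpr h))
      _ = ((l1 : Multiset Char) - (l2 : Multiset Char)).card :=
            Multiset.toFinset_sum_count_eq _
  rw [← hnat]
  push_cast
  simp [Function.comp_def]

-- ===== VERDICT (by name: the statement is the Claim_ definition above) =====
theorem solution_spec : Claim_equal_solution := by
  intro w1 w2 _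
  unfold Spec_solution solution solution_alt
  simp only []
  rw [loopA]
  have htl : (w1 ++ w2).toList = w1.toList ++ w2.toList := by simp
  rw [htl]
  set S := PySem.Set.ofList (w1.toList ++ w2.toList) with hS
  have hSnd : S.Nodup := PySem.Set.nodup_ofList _
  have hmem1 : ∀ c ∈ w1.toList, c ∈ S := by
    intro c hc; rw [hS, PySem.Set.mem_ofList]; exact List.mem_append.mpr (Or.inl hc)
  have hmem2 : ∀ c ∈ w2.toList, c ∈ S := by
    intro c hc; rw [hS, PySem.Set.mem_ofList]; exact List.mem_append.mpr (Or.inr hc)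
  -- rewrite A's two summands to count differences
  have hmapn : S.map (fun c => if (countHash w1).getD c 0 - (countHash w2).getD c 0 < 0
        then -((countHash w1).getD c 0 - (countHash w2).getD c 0) else 0)
      = S.map (fun c => if 0 < (w2.toList.count c : Int) - (w1.toList.count c : Int)
        then (w2.toList.count c : Int) - (w1.toList.count c : Int) else 0) := by
    apply List.map_congr_left; intro c _
    simp only [countHash_getD]
    split_ifs with h1 h2 <;> omega
  have hmapp : S.map (fun c => if 0 < (countHash w1).getD c 0 - (countHash w2).getD c 0
        then (countHash w1).getD c 0 - (countHash w2).getD c 0 else 0)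
      = S.map (fun c => if 0 < (w1.toList.count c : Int) - (w2.toList.count c : Int)
        then (w1.toList.count c : Int) - (w2.toList.count c : Int) else 0) := by
    apply List.map_congr_left; intro c _
    simp only [countHash_getD]
  rw [hmapn, hmapp, sum_pos_card S _ _ hSnd hmem2, sum_pos_card S _ _ hSnd hmem1]
  -- B's side: the sorted lists are permutations, so their multisets are the originals
  have hp1 : ((PySem.List.sorted w1.toList (fun c => c) false : List Char) : Multiset Char)
      = (w1.toList : Multiset Char) := Quot.sound (PySem.List.sorted_perm _ _ _)
  have hp2 : ((PySem.List.sorted w2.toList (fun c => c) false : List Char) : Multiset Char)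
      = (w2.toList : Multiset Char) := Quot.sound (PySem.List.sorted_perm _ _ _)
  rw [mergeCount_eq _ _ (by simpa using PySem.List.sorted_pairwise w1.toList (fun c => c))
      (by simpa using PySem.List.sorted_pairwise w2.toList (fun c => c)), hp1, hp2]
  rw [zero_add, zero_add, bool01 _ (by positivity), bool01 _ (by positivity), Bool.and_comm]
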